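-- pv_equiv track=rewrite | github.com/saif21/CodeForces | Python/problemSolve/boyOrGirl.py | boyOrGirl
-- ===== SOURCE A (Python) =====
-- def boyOrGirl(s):
--     dist = []
--     for i in s:
--         if i not in dist:
--             dist.append(i)
--     if len(dist) % 2 != 0:
--         return "IGNORE HIM!"
--     return "CHAT WITH HER!"
-- ===== SOURCE B (Python) =====
-- def boyOrGirl(s):
--     t = sorted(s)
--     count = 0
--     prev = None
--     for c in t:
--         if c != prev:
--             count += 1
--         prev = c
--     return "IGNORE HIM!" if count % 2 == 1 else "CHAT WITH HER!"
-- ===== Notes on version B (the rewrite author's own statement) =====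
-- stated objective: alternative
-- what changed: Replaces the quadratic seen-list membership dedup with sort-then-adjacent-comparison: sort the characters and count positions where the character differs from its predecessor.
import Mathlib
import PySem

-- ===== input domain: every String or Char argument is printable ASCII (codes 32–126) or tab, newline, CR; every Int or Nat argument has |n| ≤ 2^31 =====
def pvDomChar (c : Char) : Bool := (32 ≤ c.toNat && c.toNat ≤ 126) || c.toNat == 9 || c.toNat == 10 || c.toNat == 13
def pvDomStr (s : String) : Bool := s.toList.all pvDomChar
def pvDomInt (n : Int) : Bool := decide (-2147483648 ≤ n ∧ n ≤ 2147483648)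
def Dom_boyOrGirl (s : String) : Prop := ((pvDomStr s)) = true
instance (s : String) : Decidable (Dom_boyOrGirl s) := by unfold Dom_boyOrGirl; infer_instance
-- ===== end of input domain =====

-- B replaces A's seen-list membership dedup with sort-then-adjacent-comparison (alternative algorithm).

-- ===== PORT A =====
def boyOrGirl (s : String) : String :=
  let dist := s.toList.foldl (fun dist i => if i ∈ dist then dist else dist ++ [i]) []
  if dist.length % 2 ≠ 0 then "IGNORE HIM!" else "CHAT WITH HER!"

-- ===== PORT B =====
def boyOrGirl_alt (s : String) : String :=
  let t := PySem.List.sorted s.toList (fun c => c) false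
  let st := t.foldl
    (fun (st : Nat × Option Char) c => (if some c ≠ st.2 then st.1 + 1 else st.1, some c))
    (0, none)
  if st.1 % 2 == 1 then "IGNORE HIM!" else "CHAT WITH HER!"

-- ===== PRECONDITION & SPEC =====
def Spec_boyOrGirl (s : String) (out : String) : Prop := out = boyOrGirl_alt s
instance (s : String) (out : String) : Decidable (Spec_boyOrGirl s out) := by unfold Spec_boyOrGirl; infer_instance

-- ===== CLAIM (what is proved, stated in full; the proofs are below) =====
def Claim_equal_boyOrGirl : Prop := ∀ (s : String), Dom_boyOrGirl s → Spec_boyOrGirl s (boyOrGirl s)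

-- ===== LEMMAS AND PROOFS =====

-- A's loop: the accumulated distinct list stays nodup and collects exactly d ∪ l.
theorem distList_nodup_mem (l : List Char) : ∀ (d : List Char), d.Nodup →
    (l.foldl (fun dist i => if i ∈ dist then dist else dist ++ [i]) d).Nodup ∧
    ∀ x, x ∈ l.foldl (fun dist i => if i ∈ dist then dist else dist ++ [i]) d ↔ x ∈ d ∨ x ∈ l := by
  induction l with
  | nil => intro d hd; exact ⟨hd, fun x => by simp⟩
  | cons c l ih =>
    intro d hd
    simp only [List.foldl_cons]
    by_cases hc : c ∈ d
    · simp only [if_pos hc]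
      obtain ⟨h1, h2⟩ := ih d hd
      refine ⟨h1, fun x => ?_⟩
      rw [h2]
      constructor
      · rintro (h | h)
        · exact Or.inl h
        · exact Or.inr (List.mem_cons_of_mem _ h)
      · rintro (h | h)
        · exact Or.inl h
        · rcases List.mem_cons.mp h with h | h
          · exact Or.inl (h ▸ hc)
          · exact Or.inr h
    · simp only [if_neg hc]
      obtain ⟨h1, h2⟩ := ih (d ++ [c]) (by simp [List.nodup_append, hd]; exact fun a ha h => hc (h ▸ ha))
      refine ⟨h1, fun x => ?_⟩
      rw [h2]
      simp only [List.mem_append, List.mem_cons]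
      tauto

-- B's fold, first component, as a structural recursion.
def cntRuns : Option Char → List Char → Nat
  | _, [] => 0
  | p, c :: l => (if some c ≠ p then 1 else 0) + cntRuns (some c) l

theorem foldl_cntRuns (l : List Char) : ∀ (n : Nat) (p : Option Char),
    (l.foldl (fun (st : Nat × Option Char) c =>
      (if some c ≠ st.2 then st.1 + 1 else st.1, some c)) (n, p)).1 = n + cntRuns p l := by
  induction l with
  | nil => intro n p; simp [cntRuns]
  | cons c l ih =>
    intro n p
    simp only [List.foldl_cons, cntRuns]
    rw [ih]
    by_cases h : some c = p
    · simp [h]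
    · simp [h]; omega

theorem card_insert_erase (S : Finset Char) (c : Char) :
    (insert c S).card = 1 + (S.erase c).card := by
  by_cases h : c ∈ S
  · rw [Finset.insert_eq_self.mpr h, Finset.card_erase_of_mem h]
    have := Finset.card_pos.mpr ⟨c, h⟩
    omega
  · rw [Finset.card_insert_of_notMem h, Finset.erase_eq_of_notMem h]
    omega

theorem filter_lt_toFinset (l : List Char) (c : Char) (hl : ∀ x ∈ l, c ≤ x) :
    (l.filter (fun x => c < x)).toFinset = l.toFinset.erase c := by
  ext x
  simp only [List.mem_toFinset, List.mem_filter, Finset.mem_erase, decide_eq_true_eq]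
  constructor
  · rintro ⟨hx, hlt⟩; exact ⟨(lt_iff_le_and_ne.mp hlt).2.symm, hx⟩
  · rintro ⟨hne, hx⟩; exact ⟨hx, lt_of_le_of_ne (hl x hx) (Ne.symm hne)⟩

theorem cntRuns_some (l : List Char) : ∀ (p : Char), l.Pairwise (· ≤ ·) → (∀ x ∈ l, p ≤ x) →
    cntRuns (some p) l = (l.filter (fun x => p < x)).toFinset.card := by
  induction l with
  | nil => intro p _ _; simp [cntRuns]
  | cons c l ih =>
    intro p hp hle
    have hcl : ∀ x ∈ l, c ≤ x := fun x hx => (List.pairwise_cons.mp hp).1 x hx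
    have htail : l.Pairwise (· ≤ ·) := (List.pairwise_cons.mp hp).2
    have hpc : p ≤ c := hle c (List.mem_cons_self ..)
    by_cases h : c = p
    · subst h
      rw [show cntRuns (some c) (c :: l) = cntRuns (some c) l from by simp [cntRuns]]
      rw [ih c htail hcl]
      simp
    · have hlt : p < c := lt_of_le_of_ne hpc (Ne.symm h)
      have hfl : l.filter (fun x => p < x) = l :=
        List.filter_eq_self.mpr (fun x hx => decide_eq_true (lt_of_lt_of_le hlt (hcl x hx)))
      simp only [cntRuns, ne_eq, Option.some.injEq, h, not_false_eq_true, if_pos]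
      rw [ih c htail hcl, List.filter_cons, if_pos (decide_eq_true hlt), hfl]
      rw [List.toFinset_cons, card_insert_erase, filter_lt_toFinset l c hcl]

theorem cntRuns_none (l : List Char) (hl : l.Pairwise (· ≤ ·)) :
    cntRuns none l = l.toFinset.card := by
  cases l with
  | nil => simp [cntRuns]
  | cons c l =>
    have hcl : ∀ x ∈ l, c ≤ x := fun x hx => (List.pairwise_cons.mp hl).1 x hx
    simp only [cntRuns, ne_eq, reduceCtorEq, not_false_eq_true, if_pos]
    rw [cntRuns_some l c (List.pairwise_cons.mp hl).2 hcl]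
    rw [filter_lt_toFinset l c hcl, List.toFinset_cons, card_insert_erase]

-- Both counts equal the number of distinct characters (as a Finset card).
theorem counts_eq (l : List Char) :
    (l.foldl (fun dist i => if i ∈ dist then dist else dist ++ [i]) []).length =
    cntRuns none (PySem.List.sorted l (fun c => c) false) := by
  obtain ⟨hnd, hmem⟩ := distList_nodup_mem l [] List.nodup_nil
  rw [← List.toFinset_card_of_nodup hnd]
  have hsorted : (PySem.List.sorted l (fun c => c) false).Pairwise (· ≤ ·) :=
    PySem.List.sorted_pairwise l (fun c => c)
  rw [cntRuns_none _ hsorted]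
  congr 1
  ext x
  simp only [List.mem_toFinset, hmem x, List.not_mem_nil, false_or,
    PySem.List.mem_sorted]

-- ===== VERDICT (by name: the statement is the Claim_ definition above) =====
theorem boyOrGirl_spec : Claim_equal_boyOrGirl := by
  intro s _
  unfold Spec_boyOrGirl boyOrGirl boyOrGirl_alt
  simp only [foldl_cntRuns, Nat.zero_add]
  rw [← counts_eq s.toList]
  rcases Nat.even_or_odd ((s.toList.foldl (fun dist i => if i ∈ dist then dist else dist ++ [i]) []).length) with h | h
  · have h2 := Nat.even_iff.mp h
    simp [h2]
  · have h2 := Nat.odd_iff.mp h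
    simp [h2]
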